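-- pv_equiv track=rewrite | github.com/sanjnabali/AI-studio | Agents/code_agent.py | _extract_test_cases
-- ===== SOURCE A (Python) =====
-- from typing import Dict, List, Optional, Any, Tuple
-- from typing import Any, Dict, List, Optional
--
-- def _extract_test_cases(text: str) -> List[Dict[str, str]]:
--     """Extract test cases from test generation response"""
--     # Simple extraction of test case descriptions
--     lines = text.split('\n')
--     test_cases = []
--
--     current_case = {}
--     for line in lines:
--         if 'test_' in line.lower() or 'def test' in line:
--             if current_case:
--                 test_cases.append(current_case)
--             current_case = {"name": line.strip(), "description": ""}
--         elif current_case and line.strip().startswith('#'):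
--             current_case["description"] += line.strip() + " "
--
--     if current_case:
--         test_cases.append(current_case)
--
--     return test_cases
-- ===== SOURCE B (Python) =====
-- def _is_header(line):
--     return 'test_' in line.lower() or 'def test' in line
--
-- def _extract_test_cases(text):
--     # phase 1: segment the lines into groups, one per header line
--     groups = []
--     current = None
--     for line in text.split('\n'):
--         if _is_header(line):
--             if current is not None:
--                 groups.append(current)
--             current = [line]
--         elif current is not None:
--             current.append(line)
--     if current is not None:
--         groups.append(current)
--     # phase 2: map each group to its test-case dict
--     return [{"name": g[0].strip(),
--              "description": ''.join(l.strip() + ' ' for l in g[1:]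
--                                     if l.strip().startswith('#'))}
--             for g in groups]
-- ===== Notes on version B (the rewrite author's own statement) =====
-- stated objective: alternative
-- what changed: A builds each test-case dict incrementally inside one accumulator loop (stripping, comment-filtering and concatenating descriptions as it scans); B first segments the raw lines into groups (one per header line) and then, in a separate pass, maps each group to its dict with a join over its hash-comment lines.
import Mathlib
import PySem

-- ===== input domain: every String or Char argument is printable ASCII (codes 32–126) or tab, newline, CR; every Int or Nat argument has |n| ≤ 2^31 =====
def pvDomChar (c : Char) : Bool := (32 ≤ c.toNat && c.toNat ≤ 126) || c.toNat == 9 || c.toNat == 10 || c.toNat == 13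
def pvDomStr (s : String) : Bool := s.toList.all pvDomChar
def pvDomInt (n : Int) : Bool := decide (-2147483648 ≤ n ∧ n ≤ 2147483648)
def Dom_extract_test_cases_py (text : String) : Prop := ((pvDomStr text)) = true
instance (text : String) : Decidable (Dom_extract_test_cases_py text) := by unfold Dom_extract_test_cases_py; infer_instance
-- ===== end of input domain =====

-- B replaces A's single build-dicts-as-you-go accumulator loop by a two-phase decomposition
-- (segment the raw lines into groups, then map each group to its case dict); objective: alternative/simpler structure, same cost.

-- ===== PORT A =====
-- one loop step of A: state = (test_cases, current_case)
def pvStepA (st : List (PySem.Dict String String) × PySem.Dict String String) (line : String) :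
    List (PySem.Dict String String) × PySem.Dict String String :=
  if PySem.Str.isIn "test_" (PySem.Str.lower line) || PySem.Str.isIn "def test" line then
    ((if st.2.size ≠ 0 then st.1 ++ [st.2] else st.1),
     (PySem.Dict.empty.insert "name" (PySem.Str.strip line)).insert "description" "")
  else if st.2.size ≠ 0 ∧ PySem.Str.startswith (PySem.Str.strip line) "#" then
    (st.1, st.2.modify "description" "" (fun d => d ++ PySem.Str.strip line ++ " "))
  else st

def extract_test_cases_py (text : String) : List (List (String × String)) :=
  let lines := (PySem.Str.split? text "\n").getD []
  let st := lines.foldl pvStepA ([], PySem.Dict.empty)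
  let tcs := if st.2.size ≠ 0 then st.1 ++ [st.2] else st.1
  tcs.map (fun d => d.items)

-- ===== PORT B =====
def pvIsHeader (line : String) : Bool :=
  PySem.Str.isIn "test_" (PySem.Str.lower line) || PySem.Str.isIn "def test" line

-- phase-1 loop step: state = (groups, current group or None)
def pvStepB (st : List (List String) × Option (List String)) (line : String) :
    List (List String) × Option (List String) :=
  if pvIsHeader line then
    ((match st.2 with | some g => st.1 ++ [g] | none => st.1), some [line])
  else
    match st.2 with
    | some g => (st.1, some (g ++ [line]))
    | none => st

-- phase-2 map: a group of lines to its test-case dict (as an assoc list)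
def pvCase (g : List String) : List (String × String) :=
  [("name", PySem.Str.strip g.headI),
   ("description", PySem.Str.join "" ((g.drop 1).filterMap (fun l =>
      if PySem.Str.startswith (PySem.Str.strip l) "#" then some (PySem.Str.strip l ++ " ") else none)))]

def extract_test_cases_py_alt (text : String) : List (List (String × String)) :=
  let lines := (PySem.Str.split? text "\n").getD []
  let st := lines.foldl pvStepB ([], none)
  let groups := match st.2 with | some g => st.1 ++ [g] | none => st.1
  groups.map pvCase

-- ===== PRECONDITION & SPEC =====
def Spec_extract_test_cases_py (text : String) (out : List (List (String × String))) : Prop := out = extract_test_cases_py_alt text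
instance (text : String) (out : List (List (String × String))) : Decidable (Spec_extract_test_cases_py text out) := by unfold Spec_extract_test_cases_py; infer_instance

-- ===== CLAIM (what is proved, stated in full; the proofs are below) =====
def Claim_equal_extract_test_cases_py : Prop := ∀ (text : String), Dom_extract_test_cases_py text → Spec_extract_test_cases_py text (extract_test_cases_py text)

-- ===== LEMMAS AND PROOFS =====

-- the invariant relating A's current_case to B's current group
def pvRel (cur : PySem.Dict String String) : Option (List String) → Prop
  | none => cur = PySem.Dict.empty
  | some g => g ≠ [] ∧ cur = PySem.Dict.mk (pvCase g)

lemma pv_intercalate_nil_cons (a : List Char) (l : List (List Char)) :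
    List.intercalate ([] : List Char) (a :: l) = a ++ List.intercalate [] l := by
  cases l <;> simp [List.intercalate, List.intersperse]

lemma pv_intercalate_nil_append (l : List (List Char)) (y : List Char) :
    List.intercalate ([] : List Char) (l ++ [y]) = List.intercalate [] l ++ y := by
  induction l with
  | nil => simp [List.intercalate]
  | cons a l ih => rw [List.cons_append, pv_intercalate_nil_cons, pv_intercalate_nil_cons, ih, List.append_assoc]

lemma pv_join_empty_append (xs : List String) (y : String) :
    PySem.Str.join "" (xs ++ [y]) = PySem.Str.join "" xs ++ y := by
  apply String.ext
  simp [PySem.Str.toList_join, PySem.Chars.join, pv_intercalate_nil_append]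

lemma pv_case_append_hash (g : List String) (line : String) (hg : g ≠ [])
    (h : PySem.Str.startswith (PySem.Str.strip line) "#" = true) :
    pvCase (g ++ [line]) = [("name", PySem.Str.strip g.headI),
      ("description", (PySem.Str.join "" ((g.drop 1).filterMap (fun l =>
        if PySem.Str.startswith (PySem.Str.strip l) "#" then some (PySem.Str.strip l ++ " ") else none)))
        ++ PySem.Str.strip line ++ " ")] := by
  obtain ⟨a, g, rfl⟩ := List.exists_cons_of_ne_nil hg
  simp only [PySem.Str.startswith_eq, PySem.Str.toList_strip] at h
  rw [show ("#".toList) = ['#'] from by decide] at h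
  simp [pvCase, List.filterMap_append, h, pv_join_empty_append]
  rw [String.append_assoc]

lemma pv_case_append_nohash (g : List String) (line : String) (hg : g ≠ [])
    (h : PySem.Str.startswith (PySem.Str.strip line) "#" = false) :
    pvCase (g ++ [line]) = pvCase g := by
  obtain ⟨a, g, rfl⟩ := List.exists_cons_of_ne_nil hg
  simp only [PySem.Str.startswith_eq, PySem.Str.toList_strip] at h
  rw [show ("#".toList) = ['#'] from by decide] at h
  simp [pvCase, List.filterMap_append, h]

lemma pv_newdict (line : String) :
    (PySem.Dict.empty.insert "name" (PySem.Str.strip line)).insert "description" "" =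
      PySem.Dict.mk (pvCase [line]) := by
  simp [PySem.Dict.insert, PySem.Dict.empty, PySem.Dict.contains, pvCase, PySem.Str.join,
        PySem.Chars.join, List.intercalate]

lemma pv_stepA_header (tcs : List (PySem.Dict String String)) (cur : PySem.Dict String String)
    (line : String) (hh : pvIsHeader line = true) :
    pvStepA (tcs, cur) line =
      ((if cur.size ≠ 0 then tcs ++ [cur] else tcs), PySem.Dict.mk (pvCase [line])) := by
  unfold pvIsHeader at hh
  unfold pvStepA
  rw [if_pos hh, pv_newdict]

lemma pv_stepA_nonheader (tcs : List (PySem.Dict String String)) (cur : PySem.Dict String String)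
    (line : String) (hh : pvIsHeader line = false) :
    pvStepA (tcs, cur) line =
      if cur.size ≠ 0 ∧ PySem.Str.startswith (PySem.Str.strip line) "#" = true then
        (tcs, cur.modify "description" "" (fun d => d ++ PySem.Str.strip line ++ " "))
      else (tcs, cur) := by
  unfold pvIsHeader at hh
  unfold pvStepA
  rw [if_neg (by simp only [hh]; simp)]

lemma pv_modify_case (g : List String) (line : String) :
    (PySem.Dict.mk (pvCase g)).modify "description" "" (fun d => d ++ PySem.Str.strip line ++ " ") =
      PySem.Dict.mk [("name", PySem.Str.strip g.headI),
        ("description", (PySem.Str.join "" ((g.drop 1).filterMap (fun l =>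
          if PySem.Str.startswith (PySem.Str.strip l) "#" then some (PySem.Str.strip l ++ " ") else none)))
          ++ PySem.Str.strip line ++ " ")] := by
  simp [PySem.Dict.modify, PySem.Dict.insert, PySem.Dict.getD, PySem.Dict.get?,
        PySem.Dict.contains, pvCase]

lemma pv_loop (lines : List String) (tcs : List (PySem.Dict String String))
    (gs : List (List String)) (cur : PySem.Dict String String) (c : Option (List String))
    (h1 : tcs.map (fun d => d.items) = gs.map pvCase) (h2 : pvRel cur c) :
    (let st := lines.foldl pvStepA (tcs, cur)
     (if st.2.size ≠ 0 then st.1 ++ [st.2] else st.1).map (fun d => d.items)) =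
    (let st := lines.foldl pvStepB (gs, c)
     (match st.2 with | some g => st.1 ++ [g] | none => st.1).map pvCase) := by
  induction lines generalizing tcs gs cur c with
  | nil =>
    cases c with
    | none =>
      simp only [pvRel] at h2; subst h2
      simpa [PySem.Dict.empty, PySem.Dict.size] using h1
    | some g =>
      obtain ⟨hg, rfl⟩ := h2
      simp [PySem.Dict.size, pvCase, h1]
  | cons line rest ih =>
    simp only [List.foldl_cons]
    cases c with
    | none =>
      simp only [pvRel] at h2; subst h2
      by_cases hh : pvIsHeader line = true
      · have eA : pvStepA (tcs, PySem.Dict.empty) line = (tcs, PySem.Dict.mk (pvCase [line])) := by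
          rw [pv_stepA_header _ _ _ hh, if_neg (by simp [PySem.Dict.empty, PySem.Dict.size])]
        have eB : pvStepB (gs, none) line = (gs, some [line]) := by
          unfold pvStepB; rw [if_pos hh]
        rw [eA, eB]
        exact ih _ _ _ (some [line]) h1 ⟨by simp, rfl⟩
      · have eA : pvStepA (tcs, PySem.Dict.empty) line = (tcs, PySem.Dict.empty) := by
          rw [pv_stepA_nonheader _ _ _ (by simpa using hh),
              if_neg (by simp [PySem.Dict.empty, PySem.Dict.size])]
        have eB : pvStepB (gs, none) line = (gs, none) := by
          unfold pvStepB; rw [if_neg hh]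
        rw [eA, eB]
        exact ih _ _ _ none h1 rfl
    | some g =>
      obtain ⟨hg, rfl⟩ := h2
      by_cases hh : pvIsHeader line = true
      · have eA : pvStepA (tcs, PySem.Dict.mk (pvCase g)) line =
            (tcs ++ [PySem.Dict.mk (pvCase g)], PySem.Dict.mk (pvCase [line])) := by
          rw [pv_stepA_header _ _ _ hh, if_pos (by simp [PySem.Dict.size, pvCase])]
        have eB : pvStepB (gs, some g) line = (gs ++ [g], some [line]) := by
          unfold pvStepB; rw [if_pos hh]
        rw [eA, eB]
        exact ih _ _ _ (some [line]) (by simp [h1, pvCase]) ⟨by simp, rfl⟩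
      · have eB : pvStepB (gs, some g) line = (gs, some (g ++ [line])) := by
          unfold pvStepB; rw [if_neg hh]
        by_cases hs : PySem.Str.startswith (PySem.Str.strip line) "#" = true
        · have eA : pvStepA (tcs, PySem.Dict.mk (pvCase g)) line =
              (tcs, PySem.Dict.mk (pvCase (g ++ [line]))) := by
            rw [pv_stepA_nonheader _ _ _ (by simpa using hh),
                if_pos ⟨by simp [PySem.Dict.size, pvCase], hs⟩, pv_modify_case,
                pv_case_append_hash g line hg hs]
          rw [eA, eB]
          exact ih _ _ _ (some (g ++ [line])) h1 ⟨by simp, rfl⟩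
        · have eA : pvStepA (tcs, PySem.Dict.mk (pvCase g)) line =
              (tcs, PySem.Dict.mk (pvCase (g ++ [line]))) := by
            rw [pv_stepA_nonheader _ _ _ (by simpa using hh), if_neg (by
                  simp only [PySem.Str.startswith_eq, PySem.Str.toList_strip,
                    show ("#".toList) = ['#'] from by decide] at hs
                  simp [hs]),
                pv_case_append_nohash g line hg (by simpa using hs)]
          rw [eA, eB]
          exact ih _ _ _ (some (g ++ [line])) h1 ⟨by simp, rfl⟩

-- ===== VERDICT (by name: the statement is the Claim_ definition above) =====
theorem extract_test_cases_py_spec : Claim_equal_extract_test_cases_py := by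
  intro text _
  unfold Spec_extract_test_cases_py extract_test_cases_py extract_test_cases_py_alt
  exact pv_loop _ [] [] PySem.Dict.empty none (by simp) (by simp [pvRel])
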